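-- pv_equiv track=rewrite | github.com/YalfimovIvan/Crypta | affine_recurrent_shifr.py | affine_recurrent_shifr
-- ===== SOURCE A (Python) =====
-- def affine_recurrent_shifr(text, a1, a2, b1, b2, alph):
--     """
--     Шифрует текст с использованием аффинного рекуррентного шифра.
--     """
--     shifr_text = ""
--     m = len(alph)
--     a_prev, a_curr = a1, a2  # Инициализация ключей a
--     b_prev, b_curr = b1, b2  # Инициализация ключей b
--     for symbol in text:
--         if symbol in alph:
--             x = alph.index(symbol)  # Символ в виде числа
--             y = (a_curr * x + b_curr) % m  # Шифрование
--             shifr_text += alph[y]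
--             # Обновление ключей
--             a_next = (a_curr * a_prev) % m
--             b_next = (b_curr + b_prev) % m
--             a_prev, a_curr = a_curr, a_next
--             b_prev, b_curr = b_curr, b_next
--         else:
--             shifr_text += symbol  # Оставляем символы, не входящие в алфавит
--     return shifr_text
-- ===== SOURCE B (Python) =====
-- def affine_recurrent_shifr(text, a1, a2, b1, b2, alph):
--     m = len(alph)
--     # pass 1: key schedule, one (a,b) pair per encodable character
--     n = sum(1 for ch in text if ch in alph)
--     keys = []
--     ap, ac, bp, bc = a1, a2, b1, b2
--     for _ in range(n):
--         keys.append((ac, bc))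
--         ap, ac, bp, bc = ac, (ac * ap) % m, bc, (bc + bp) % m
--     # pass 2: apply the schedule
--     out = []
--     i = 0
--     for ch in text:
--         if ch in alph:
--             a, b = keys[i]
--             i += 1
--             out.append(alph[(a * alph.index(ch) + b) % m])
--         else:
--             out.append(ch)
--     return "".join(out)
-- ===== Notes on version B (the rewrite author's own statement) =====
-- stated objective: alternative
-- what changed: Split A's single fused loop (which interleaves key updates with encryption) into two passes: first count encodable characters and precompute the full (a,b) key schedule by iterating the recurrence, then a separate application pass that consumes the schedule by index while copying non-alphabet symbols through.
import Mathlib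
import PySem

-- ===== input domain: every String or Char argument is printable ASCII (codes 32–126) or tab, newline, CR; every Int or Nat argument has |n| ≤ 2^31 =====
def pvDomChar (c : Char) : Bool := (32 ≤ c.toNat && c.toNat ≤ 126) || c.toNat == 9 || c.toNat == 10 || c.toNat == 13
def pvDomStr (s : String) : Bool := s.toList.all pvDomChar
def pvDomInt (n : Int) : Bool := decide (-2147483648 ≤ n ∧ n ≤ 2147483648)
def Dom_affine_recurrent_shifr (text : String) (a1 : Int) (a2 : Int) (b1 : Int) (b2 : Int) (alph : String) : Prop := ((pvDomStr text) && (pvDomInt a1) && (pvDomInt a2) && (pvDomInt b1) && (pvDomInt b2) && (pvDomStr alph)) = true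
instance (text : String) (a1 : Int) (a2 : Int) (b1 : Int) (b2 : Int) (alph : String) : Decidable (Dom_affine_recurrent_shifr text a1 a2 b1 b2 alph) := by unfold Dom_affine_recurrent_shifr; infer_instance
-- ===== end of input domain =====

-- B replaces A's fused encrypt-and-update loop by a key-schedule precompute pass plus a
-- separate application pass (alternative decomposition, same cost). Both are total.

-- ===== PORT A =====
-- A's loop as structural recursion over the text with the rolling key state.
-- 'alph.index(symbol)' = first index (index? is some since membership holds; getD 0 never defaults);
-- 'alph[y]' always succeeds since 0 ≤ y < m (m > 0 when the branch is taken), so getD never defaults.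
def arsLoopA (al : List Char) (m : Int) : List Char → Int → Int → Int → Int → List Char
  | [], _, _, _, _ => []
  | c :: rest, ap, ac, bp, bc =>
    if c ∈ al then
      let x : Int := ((PySem.List.index? al c).getD 0 : Nat)
      let y := PySem.Int.mod (ac * x + bc) m
      ((PySem.List.pyGet? al y).getD c)
        :: arsLoopA al m rest ac (PySem.Int.mod (ac * ap) m) bc (PySem.Int.mod (bc + bp) m)
    else
      c :: arsLoopA al m rest ap ac bp bc

def affine_recurrent_shifr (text : String) (a1 : Int) (a2 : Int) (b1 : Int) (b2 : Int) (alph : String) : String :=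
  String.ofList (arsLoopA alph.toList (alph.toList.length : Int) text.toList a1 a2 b1 b2)

-- ===== PORT B =====
-- pass 1: the key schedule, one (a,b) pair per encodable character
def arsSchedule (m : Int) : Nat → Int → Int → Int → Int → List (Int × Int)
  | 0, _, _, _, _ => []
  | n + 1, ap, ac, bp, bc =>
    (ac, bc) :: arsSchedule m n ac (PySem.Int.mod (ac * ap) m) bc (PySem.Int.mod (bc + bp) m)

-- pass 2: apply the schedule in order, copying non-alphabet symbols through
def arsApply (al : List Char) (m : Int) : List Char → List (Int × Int) → List Char
  | [], _ => []
  | c :: rest, ks =>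
    if c ∈ al then
      match ks with
      | [] => c :: arsApply al m rest []   -- unreachable: the schedule has one pair per encodable char
      | (a, b) :: ks' =>
        let x : Int := ((PySem.List.index? al c).getD 0 : Nat)
        ((PySem.List.pyGet? al (PySem.Int.mod (a * x + b) m)).getD c) :: arsApply al m rest ks'
    else
      c :: arsApply al m rest ks

def affine_recurrent_shifr_alt (text : String) (a1 : Int) (a2 : Int) (b1 : Int) (b2 : Int) (alph : String) : String :=
  let al := alph.toList
  let m : Int := (al.length : Int)
  let n := text.toList.countP (· ∈ al)
  String.ofList (arsApply al m text.toList (arsSchedule m n a1 a2 b1 b2))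

-- ===== PRECONDITION & SPEC =====
def Spec_affine_recurrent_shifr (text : String) (a1 : Int) (a2 : Int) (b1 : Int) (b2 : Int) (alph : String) (out : String) : Prop := out = affine_recurrent_shifr_alt text a1 a2 b1 b2 alph
instance (text : String) (a1 : Int) (a2 : Int) (b1 : Int) (b2 : Int) (alph : String) (out : String) : Decidable (Spec_affine_recurrent_shifr text a1 a2 b1 b2 alph out) := by unfold Spec_affine_recurrent_shifr; infer_instance

-- ===== CLAIM (what is proved, stated in full; the proofs are below) =====
def Claim_equal_affine_recurrent_shifr : Prop := ∀ (text : String) (a1 : Int) (a2 : Int) (b1 : Int) (b2 : Int) (alph : String), Dom_affine_recurrent_shifr text a1 a2 b1 b2 alph → Spec_affine_recurrent_shifr text a1 a2 b1 b2 alph (affine_recurrent_shifr text a1 a2 b1 b2 alph)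

-- ===== LEMMAS AND PROOFS =====
-- Loop invariant: A's fused loop equals B's application pass run on the schedule of exactly
-- countP chars pairs seeded with the current key state.
theorem arsLoopA_eq_apply (al : List Char) (m : Int) (chars : List Char) :
    ∀ (ap ac bp bc : Int),
      arsLoopA al m chars ap ac bp bc
        = arsApply al m chars (arsSchedule m (chars.countP (· ∈ al)) ap ac bp bc) := by
  induction chars with
  | nil => intro ap ac bp bc; simp [arsLoopA, arsApply]
  | cons c rest ih =>
    intro ap ac bp bc
    by_cases h : c ∈ al
    · simp [arsLoopA, arsApply, h, arsSchedule, ih]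
    · simp [arsLoopA, arsApply, h, ih]

-- ===== VERDICT (by name: the statement is the Claim_ definition above) =====
theorem affine_recurrent_shifr_spec : Claim_equal_affine_recurrent_shifr := by
  intro text a1 a2 b1 b2 alph _
  unfold Spec_affine_recurrent_shifr affine_recurrent_shifr affine_recurrent_shifr_alt
  simp [arsLoopA_eq_apply]
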